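-- pv_equiv track=rewrite | github.com/Mikolmisol/RNAJP-On-Google-Colab | parse2D.py | determine_if_PK_in_loop
-- ===== SOURCE A (Python) =====
-- def determine_if_PK_in_loop(list_PK_helices,loop,loop_type=None):
--     has_PK_interaction = False
--     for PK_helix in list_PK_helices:
--         left_helix_ib = PK_helix[0][0]
--         left_helix_ie = PK_helix[1][0]
--         right_helix_ib = PK_helix[1][1]
--         right_helix_ie = PK_helix[0][1]
--         if loop_type == "2way_loops" and left_helix_ib == left_helix_ie:
--             continue
--         for subloop in loop:
--             loop_ib, loop_ie = subloop
--             if left_helix_ib >= loop_ib and left_helix_ie <= loop_ie: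
--                 has_PK_interaction = True
--                 break
--             if right_helix_ib >= loop_ib and right_helix_ie <= loop_ie:
--                 has_PK_interaction = True
--                 break
--         if has_PK_interaction:
--             break
--     return has_PK_interaction
-- ===== SOURCE B (Python) =====
-- def determine_if_PK_in_loop(list_PK_helices, loop, loop_type=None):
--     # Sort subloops by start and take prefix maxima of ends; then an interval
--     # (l, r) lies inside some subloop iff the maximal end among subloops whose
--     # start is <= l (located by binary search) reaches r.
--     subs = sorted(loop, key=lambda q: q[0])
--     starts = [q[0] for q in subs]
--     prefmax = []
--     m = None
--     for q in subs:
--         if m is None or q[1] > m: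
--             m = q[1]
--         prefmax.append(m)
--
--     def covered(l, r):
--         lo, hi = 0, len(starts)
--         while lo < hi:
--             mid = (lo + hi) // 2
--             if starts[mid] <= l:
--                 lo = mid + 1
--             else:
--                 hi = mid
--         return lo > 0 and prefmax[lo - 1] >= r
--
--     for PK_helix in list_PK_helices:
--         lb, re_ = PK_helix[0]
--         le, rb = PK_helix[1]
--         if loop_type == "2way_loops" and lb == le:
--             continue
--         if covered(lb, le) or covered(rb, re_):
--             return True
--     return False
-- ===== Notes on version B (the rewrite author's own statement) =====
-- stated objective: faster
-- what changed: B sorts the subloops by start once, builds prefix maxima of ends, and answers each helix-interval containment query by binary search instead of A's inner scan over all subloops per helix.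
-- outside the precondition, e.g. on determine_if_PK_in_loop([[(0, 10), (1, 9)], []], [(0, 10)], None): A returns True, B returns True
import Mathlib
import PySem

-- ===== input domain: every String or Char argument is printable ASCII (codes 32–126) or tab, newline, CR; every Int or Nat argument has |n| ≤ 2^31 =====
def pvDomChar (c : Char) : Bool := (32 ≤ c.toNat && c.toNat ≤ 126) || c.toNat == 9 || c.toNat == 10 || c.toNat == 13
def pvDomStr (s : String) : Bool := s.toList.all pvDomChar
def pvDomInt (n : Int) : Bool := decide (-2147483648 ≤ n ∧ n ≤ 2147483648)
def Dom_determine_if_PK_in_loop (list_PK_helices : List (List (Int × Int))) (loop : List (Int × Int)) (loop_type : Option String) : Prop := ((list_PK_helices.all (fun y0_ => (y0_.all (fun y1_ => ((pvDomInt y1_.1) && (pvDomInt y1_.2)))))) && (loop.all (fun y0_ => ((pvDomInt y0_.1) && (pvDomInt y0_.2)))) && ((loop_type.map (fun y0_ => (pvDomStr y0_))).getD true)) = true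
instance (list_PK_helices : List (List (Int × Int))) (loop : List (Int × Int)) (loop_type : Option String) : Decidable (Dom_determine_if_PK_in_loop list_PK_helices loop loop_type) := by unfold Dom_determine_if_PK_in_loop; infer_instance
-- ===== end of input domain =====

-- B sorts the subloops by start once, builds prefix maxima of ends, and answers each
-- helix-interval containment query by binary search (objective: faster, asymptotic).

-- ===== PORT A =====
-- inner 'for subloop in loop' with its two containment checks and breaks
def pvAInner (lb le rb re : Int) : List (Int × Int) → Bool
  | [] => false
  | (ib, ie) :: rest =>
    if lb ≥ ib ∧ le ≤ ie then true
    else if rb ≥ ib ∧ re ≤ ie then true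
    else pvAInner lb le rb re rest

-- outer 'for PK_helix in list_PK_helices' with the has_PK_interaction flag/break;
-- PK_helix[0]/PK_helix[1] via pyGet? (none = IndexError, excluded by Pre_; false there)
def pvAOuter (loop : List (Int × Int)) (loop_type : Option String) : List (List (Int × Int)) → Bool
  | [] => false
  | h :: rest =>
    match PySem.List.pyGet? h 0, PySem.List.pyGet? h 1 with
    | some p0, some p1 =>
      let lb := p0.1; let le := p1.1; let rb := p1.2; let re := p0.2
      if loop_type = some "2way_loops" ∧ lb = le then pvAOuter loop loop_type rest
      else if pvAInner lb le rb re loop then true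
      else pvAOuter loop loop_type rest
    | _, _ => false

def determine_if_PK_in_loop (list_PK_helices : List (List (Int × Int))) (loop : List (Int × Int)) (loop_type : Option String) : Bool :=
  pvAOuter loop loop_type list_PK_helices

-- ===== PORT B =====
-- the prefix-maximum pass of Source B ('for q in subs: … prefmax.append(m)')
def pvPrefMax : List (Int × Int) → Option Int → List Int
  | [], _ => []
  | q :: rest, m =>
    let m' := match m with
      | none => q.2
      | some v => if q.2 > v then q.2 else v
    m' :: pvPrefMax rest (some m')

-- Source B's hand-written 'while lo < hi' binary search; starts[mid] is always in
-- range there (lo ≤ mid < hi ≤ len), so getD mid 0 is exact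
-- '(lo + hi) // 2' on the nonnegative lo, hi is Nat division, identical to Python's //
def pvBSearch (starts : List Int) (l : Int) (lo hi : Nat) : Nat :=
  if lo < hi then
    let mid := (lo + hi) / 2
    if starts.getD mid 0 ≤ l then pvBSearch starts l (mid + 1) hi
    else pvBSearch starts l lo mid
  else lo
termination_by hi - lo
decreasing_by all_goals omega

-- Source B's 'covered(l, r)'; prefmax[lo-1] is in range when lo > 0
def pvCovered (starts prefmax : List Int) (l r : Int) : Bool :=
  let lo := pvBSearch starts l 0 starts.length
  decide (0 < lo) && decide (r ≤ prefmax.getD (lo - 1) 0)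

-- Source B's final 'for PK_helix in list_PK_helices' loop
def pvBOuter (starts prefmax : List Int) (loop_type : Option String) : List (List (Int × Int)) → Bool
  | [] => false
  | h :: rest =>
    match PySem.List.pyGet? h 0, PySem.List.pyGet? h 1 with
    | some p0, some p1 =>
      let lb := p0.1; let re := p0.2; let le := p1.1; let rb := p1.2
      if loop_type = some "2way_loops" ∧ lb = le then pvBOuter starts prefmax loop_type rest
      else if pvCovered starts prefmax lb le || pvCovered starts prefmax rb re then true
      else pvBOuter starts prefmax loop_type rest
    | _, _ => false

def determine_if_PK_in_loop_alt (list_PK_helices : List (List (Int × Int))) (loop : List (Int × Int)) (loop_type : Option String) : Bool :=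
  let subs := PySem.List.sorted loop (fun q => q.1) false
  let starts := subs.map (fun q => q.1)
  let prefmax := pvPrefMax subs none
  pvBOuter starts prefmax loop_type list_PK_helices

-- ===== PRECONDITION & SPEC =====
-- Pre_ excludes inputs where some helix has fewer than 2 pairs: Python A raises
-- IndexError there unless an earlier helix already matched (B likewise).
def Pre_determine_if_PK_in_loop (list_PK_helices : List (List (Int × Int))) (loop : List (Int × Int)) (loop_type : Option String) : Prop :=
  ∀ h ∈ list_PK_helices, 2 ≤ h.length
instance (list_PK_helices : List (List (Int × Int))) (loop : List (Int × Int)) (loop_type : Option String) : Decidable (Pre_determine_if_PK_in_loop list_PK_helices loop loop_type) := by unfold Pre_determine_if_PK_in_loop; infer_instance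
def pvWitness_determine_if_PK_in_loop : (List (List (Int × Int))) × (List (Int × Int)) × Option String :=
  ([[(1, 9), (3, 7)]], [(0, 10)], none)

def Spec_determine_if_PK_in_loop (list_PK_helices : List (List (Int × Int))) (loop : List (Int × Int)) (loop_type : Option String) (out : Bool) : Prop := out = determine_if_PK_in_loop_alt list_PK_helices loop loop_type
instance (list_PK_helices : List (List (Int × Int))) (loop : List (Int × Int)) (loop_type : Option String) (out : Bool) : Decidable (Spec_determine_if_PK_in_loop list_PK_helices loop loop_type out) := by unfold Spec_determine_if_PK_in_loop; infer_instance

-- ===== CLAIM =====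
def Claim_equal_determine_if_PK_in_loop : Prop := ∀ (list_PK_helices : List (List (Int × Int))) (loop : List (Int × Int)) (loop_type : Option String), Dom_determine_if_PK_in_loop list_PK_helices loop loop_type → Pre_determine_if_PK_in_loop list_PK_helices loop loop_type → Spec_determine_if_PK_in_loop list_PK_helices loop loop_type (determine_if_PK_in_loop list_PK_helices loop loop_type)

-- ===== LEMMAS AND PROOFS =====

lemma pvOrReassoc (a b x y : Bool) : (a || (b || (x || y))) = ((a || x) || (b || y)) := by
  cases a <;> cases b <;> cases x <;> cases y <;> rfl

-- A's inner scan is an existence test over the subloops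
lemma pvAInner_eq_any (lb le rb re : Int) (loop : List (Int × Int)) :
    pvAInner lb le rb re loop
      = (loop.any (fun q => q.1 ≤ lb && le ≤ q.2) || loop.any (fun q => q.1 ≤ rb && re ≤ q.2)) := by
  induction loop with
  | nil => rfl
  | cons q rest ih =>
    obtain ⟨ib, ie⟩ := q
    have hif : ∀ (p : Prop) (inst : Decidable p) (x : Bool), (if p then true else x) = (decide p || x) := by
      intro p inst x; by_cases h : p <;> simp [h]
    simp only [pvAInner, hif, List.any_cons, ih, Bool.decide_and, ge_iff_le]
    exact pvOrReassoc _ _ _ _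

-- prefmax[i] reaches r iff the initial accumulator or some end among the first i+1 does
lemma pvPrefMax_getD (subs : List (Int × Int)) (m : Option Int) (i : Nat) (hi : i < subs.length) (r : Int) :
    (r ≤ (pvPrefMax subs m).getD i 0)
      ↔ ((∃ v, m = some v ∧ r ≤ v) ∨ ∃ j, ∃ hj : j < subs.length, j ≤ i ∧ r ≤ subs[j].2) := by
  induction subs generalizing m i with
  | nil => simp at hi
  | cons q rest ih =>
    cases i with
    | zero =>
      simp only [pvPrefMax, List.getD_cons_zero]
      constructor
      · intro h
        cases m with
        | none => exact Or.inr ⟨0, by simp, le_refl 0, by simpa using h⟩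
        | some v =>
          simp only at h
          by_cases hgt : q.2 > v
          · rw [if_pos hgt] at h
            exact Or.inr ⟨0, by simp, le_refl 0, by simpa using h⟩
          · rw [if_neg hgt] at h
            exact Or.inl ⟨v, rfl, h⟩
      · intro h
        rcases h with ⟨v, hv, hrv⟩ | ⟨j, hj, hj0, hrj⟩
        · subst hv; simp only
          by_cases hgt : q.2 > v
          · rw [if_pos hgt]; omega
          · rw [if_neg hgt]; exact hrv
        · interval_cases j
          simp only [List.getElem_cons_zero] at hrj
          cases m with
          | none => simpa using hrj
          | some v =>
            simp only
            by_cases hgt : q.2 > v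
            · rw [if_pos hgt]; exact hrj
            · rw [if_neg hgt]; omega
    | succ i' =>
      have hi' : i' < rest.length := by simpa using hi
      simp only [pvPrefMax, List.getD_cons_succ]
      rw [ih _ i' hi']
      constructor
      · rintro (⟨v, hv, hrv⟩ | ⟨j, hj, hji, hrj⟩)
        · -- v is the updated accumulator m'
          cases m with
          | none =>
            simp only [Option.some.injEq] at hv
            exact Or.inr ⟨0, by simp, by omega, by simp only [List.getElem_cons_zero]; omega⟩
          | some w =>
            simp only [Option.some.injEq] at hv
            by_cases hgt : q.2 > w
            · rw [if_pos hgt] at hv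
              exact Or.inr ⟨0, by simp, by omega, by simp only [List.getElem_cons_zero]; omega⟩
            · rw [if_neg hgt] at hv
              exact Or.inl ⟨w, rfl, by omega⟩
        · exact Or.inr ⟨j + 1, by simpa using hj, by omega, by simpa using hrj⟩
      · rintro (⟨v, hv, hrv⟩ | ⟨j, hj, hji, hrj⟩)
        · subst hv
          refine Or.inl ⟨_, rfl, ?_⟩
          simp only
          by_cases hgt : q.2 > v
          · rw [if_pos hgt]; omega
          · rw [if_neg hgt]; exact hrv
        · cases j with
          | zero =>
            refine Or.inl ⟨_, rfl, ?_⟩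
            simp only [List.getElem_cons_zero] at hrj
            cases m with
            | none => simpa using hrj
            | some w =>
              simp only
              by_cases hgt : q.2 > w
              · rw [if_pos hgt]; exact hrj
              · rw [if_neg hgt]; omega
          | succ j' =>
            exact Or.inr ⟨j', by simpa using hj, by omega, by simpa using hrj⟩

-- the binary-search loop: invariant in, partition point out
lemma pvBSearch_loop (starts : List Int) (l : Int) (lo hi : Nat)
    (hmono : ∀ i j, i ≤ j → j < starts.length → starts.getD i 0 ≤ starts.getD j 0)
    (hhi : hi ≤ starts.length) (hle : lo ≤ hi)
    (hbelow : ∀ i, i < lo → starts.getD i 0 ≤ l)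
    (habove : ∀ i, hi ≤ i → i < starts.length → ¬ starts.getD i 0 ≤ l) :
    lo ≤ pvBSearch starts l lo hi ∧ pvBSearch starts l lo hi ≤ hi ∧
    (∀ i, i < pvBSearch starts l lo hi → starts.getD i 0 ≤ l) ∧
    (∀ i, pvBSearch starts l lo hi ≤ i → i < starts.length → ¬ starts.getD i 0 ≤ l) := by
  by_cases h : lo < hi
  · rw [pvBSearch, if_pos h]
    set mid := (lo + hi) / 2 with hmid
    have hmidlt : mid < hi := by omega
    have hmidge : lo ≤ mid := by omega
    by_cases hc : starts.getD mid 0 ≤ l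
    · rw [if_pos hc]
      have := pvBSearch_loop starts l (mid + 1) hi hmono hhi (by omega)
        (fun i hilt => hmono i mid (by omega) (by omega) |>.trans hc) habove
      exact ⟨by omega, this.2.1, this.2.2.1, this.2.2.2⟩
    · rw [if_neg hc]
      have := pvBSearch_loop starts l lo mid hmono (by omega) hmidge hbelow
        (fun i hge hilt hle' => hc ((hmono mid i hge hilt).trans hle'))
      exact ⟨this.1, by omega, this.2.2.1, this.2.2.2⟩
  · rw [pvBSearch, if_neg h]
    have : lo = hi := by omega
    subst this
    exact ⟨le_refl _, le_refl _, hbelow, habove⟩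
termination_by hi - lo
decreasing_by all_goals omega

-- covered(l, r) is exactly 'some subloop contains (l, r)'
lemma pvCovered_eq_any (loop : List (Int × Int)) (l r : Int) :
    pvCovered ((PySem.List.sorted loop (fun q => q.1) false).map (fun q => q.1))
      (pvPrefMax (PySem.List.sorted loop (fun q => q.1) false) none) l r
      = loop.any (fun q => q.1 ≤ l && r ≤ q.2) := by
  set subs := PySem.List.sorted loop (fun q => q.1) false with hsubs
  set starts := subs.map (fun q => q.1) with hstarts
  have hlen : starts.length = subs.length := by simp [hstarts]
  have hget : ∀ (i : Nat) (hi : i < subs.length), starts.getD i 0 = subs[i].1 := by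
    intro i hi
    rw [hstarts, List.getD_eq_getElem _ _ (by simpa using hi), List.getElem_map]
  have hpair : subs.Pairwise (fun a b => a.1 ≤ b.1) := PySem.List.sorted_pairwise loop _
  have hmono : ∀ i j, i ≤ j → j < starts.length → starts.getD i 0 ≤ starts.getD j 0 := by
    intro i j hij hj
    rw [hget i (by omega), hget j (by omega)]
    rcases eq_or_lt_of_le hij with rfl | hlt
    · exact le_refl _
    · exact (List.pairwise_iff_getElem.mp hpair) i j (by omega) (by omega) hlt
  obtain ⟨hk1, hk2, hbelow, habove⟩ := pvBSearch_loop starts l 0 starts.length hmono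
    (le_refl _) (Nat.zero_le _) (by omega) (fun i h1 h2 => absurd h1 (by omega))
  set k := pvBSearch starts l 0 starts.length with hk
  have hperm : subs.Perm loop := PySem.List.sorted_perm loop _ _
  rw [← hperm.any_eq]
  unfold pvCovered
  rw [← hk]
  rcases Nat.eq_zero_or_pos k with hk0 | hkpos
  · -- k = 0: no subloop has start ≤ l
    simp only [hk0, Nat.lt_irrefl, decide_false, Bool.false_and]
    symm
    rw [List.any_eq_false]
    rintro ⟨a, b⟩ hmem
    obtain ⟨i, hi, hqi⟩ := List.getElem_of_mem hmem
    have := habove i (by omega) (by omega)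
    rw [hget i hi, hqi] at this
    simp only [Bool.and_eq_true, decide_eq_true_eq, not_and]
    intro hal; exact absurd hal this
  · simp only [hkpos, decide_true, Bool.true_and]
    have hkle : k - 1 < subs.length := by omega
    have hiff : (r ≤ (pvPrefMax subs none).getD (k - 1) 0)
        ↔ (subs.any (fun q => q.1 ≤ l && r ≤ q.2) = true) := by
      rw [pvPrefMax_getD subs none (k - 1) hkle r]
      constructor
      · rintro (⟨v, hv, _⟩ | ⟨j, hj, hji, hrj⟩)
        · exact absurd hv (by simp)
        · rw [List.any_eq_true]
          refine ⟨subs[j], List.getElem_mem _, ?_⟩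
          have hstart : subs[j].1 ≤ l := by
            have := hbelow j (by omega)
            rwa [hget j hj] at this
          simp [hstart, hrj]
      · intro h
        rw [List.any_eq_true] at h
        obtain ⟨q, hmem, hq⟩ := h
        simp only [Bool.and_eq_true, decide_eq_true_eq] at hq
        obtain ⟨j, hj, hqj⟩ := List.getElem_of_mem hmem
        have hjk : j < k := by
          by_contra hge
          have := habove j (by omega) (by omega)
          rw [hget j hj, hqj] at this
          exact this hq.1
        exact Or.inr ⟨j, hj, by omega, by rw [hqj]; exact hq.2⟩
    by_cases hr : r ≤ (pvPrefMax subs none).getD (k - 1) 0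
    · rw [hiff.mp hr]; exact decide_eq_true hr
    · have hfalse : subs.any (fun q => q.1 ≤ l && r ≤ q.2) = false := by
        cases h : subs.any (fun q => q.1 ≤ l && r ≤ q.2)
        · rfl
        · exact absurd (hiff.mpr h) hr
      rw [hfalse]; exact decide_eq_false hr

-- the two outer loops coincide once the inner tests do
lemma pvOuter_eq (loop : List (Int × Int)) (loop_type : Option String)
    (hs : List (List (Int × Int)))
    (hpre : ∀ h ∈ hs, 2 ≤ h.length) :
    pvAOuter loop loop_type hs
      = pvBOuter ((PySem.List.sorted loop (fun q => q.1) false).map (fun q => q.1))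
          (pvPrefMax (PySem.List.sorted loop (fun q => q.1) false) none) loop_type hs := by
  induction hs with
  | nil => rfl
  | cons h rest ih =>
    have hlen : 2 ≤ h.length := hpre h (List.mem_cons_self)
    have hrest := fun x hx => hpre x (List.mem_cons_of_mem h hx)
    obtain ⟨p0, t, rfl⟩ : ∃ p0 t, h = p0 :: t := by
      cases h with | nil => simp at hlen | cons a t => exact ⟨a, t, rfl⟩
    obtain ⟨p1, t', rfl⟩ : ∃ p1 t', t = p1 :: t' := by
      cases t with | nil => simp at hlen | cons a t' => exact ⟨a, t', rfl⟩
    have hnn : (0:Int) ≤ (t'.length : Int) + 1 := by positivity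
    have hg0 : PySem.List.pyGet? (p0 :: p1 :: t') (0 : Int) = some p0 := by
      simp [PySem.List.pyGet?, PySem.List.pyIdx?, hnn]
    have hg1 : PySem.List.pyGet? (p0 :: p1 :: t') (1 : Int) = some p1 := by
      simp [PySem.List.pyGet?, PySem.List.pyIdx?]
    simp only [pvAOuter, pvBOuter, hg0, hg1]
    by_cases hskip : loop_type = some "2way_loops" ∧ p0.1 = p1.1
    · simp only [if_pos hskip]
      exact ih hrest
    · simp only [if_neg hskip]
      rw [pvAInner_eq_any, pvCovered_eq_any loop p0.1 p1.1, pvCovered_eq_any loop p1.2 p0.2,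
        ih hrest]

-- ===== VERDICT (by name: the statement is the Claim_ definition above) =====
theorem determine_if_PK_in_loop_spec : Claim_equal_determine_if_PK_in_loop := by
  intro hs loop lt _ hpre
  unfold Spec_determine_if_PK_in_loop determine_if_PK_in_loop determine_if_PK_in_loop_alt
  exact pvOuter_eq loop lt hs hpre
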